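-- pv_equiv track=rewrite | github.com/CIAMOD/markoff_fibonacci_m_triples | check_minimal_triples.py | process_combinations
-- ===== SOURCE A (Python) =====
-- def process_combinations(indexes: list[tuple[int, int, int]], all_fibs: dict) -> dict:
--     """
--     This function calculates m-values for all Fibonacci triples, given the processed
--     indexes and the dictionary containing the Fibonacci sequence. It returns a
--     dictionary where the key is the m-value and the value is the list of minimal triples
--     that satisfy that m-value (both indexes and Fibonacci values).
--
--     Parameters:
--     - indexes: list[tuple[int, int, int]]
--
--     Returns:
--     - dict
--     """
--     dict_m = {}
--     for a, b, c in indexes: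
--         fa, fb, fc = all_fibs[a], all_fibs[b], all_fibs[c]
--         m = fa * fa + fb * fb + fc * fc - 3 * fa * fb * fc
--         if m > 0:
--             if m not in dict_m:
--                 dict_m[m] = [((a, b, c), (fa, fb, fc))]
--             else:
--                 dict_m[m] += [((a, b, c), (fa, fb, fc))]
--     return dict_m
-- ===== SOURCE B (Python) =====
-- def process_combinations(indexes: list[tuple[int, int, int]], all_fibs: dict) -> dict:
--     # Staged map/filter pipeline: compute each triple's m with a pure helper,
--     # take the distinct positive m-values in first-occurrence order, then build
--     # each group by filtering the index list on that m-value (no dict accumulation).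
--     def m_of(t):
--         a, b, c = t
--         fa, fb, fc = all_fibs[a], all_fibs[b], all_fibs[c]
--         return fa * fa + fb * fb + fc * fc - 3 * fa * fb * fc
--
--     def entry(t):
--         a, b, c = t
--         return ((a, b, c), (all_fibs[a], all_fibs[b], all_fibs[c]))
--
--     keys = dict.fromkeys(m for m in map(m_of, indexes) if m > 0)
--     return {m: [entry(t) for t in indexes if m_of(t) == m] for m in keys}
-- ===== Notes on version B (the rewrite author's own statement) =====
-- stated objective: alternative
-- what changed: Replaces A's single-pass dict accumulation (branching on key presence, appending in place) by a staged map/filter pipeline: a pure m-of-triple helper, an ordered dedup of the positive m-values, and one filtering scan of the index list per distinct m; no dict is threaded through the loop.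
import Mathlib
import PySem

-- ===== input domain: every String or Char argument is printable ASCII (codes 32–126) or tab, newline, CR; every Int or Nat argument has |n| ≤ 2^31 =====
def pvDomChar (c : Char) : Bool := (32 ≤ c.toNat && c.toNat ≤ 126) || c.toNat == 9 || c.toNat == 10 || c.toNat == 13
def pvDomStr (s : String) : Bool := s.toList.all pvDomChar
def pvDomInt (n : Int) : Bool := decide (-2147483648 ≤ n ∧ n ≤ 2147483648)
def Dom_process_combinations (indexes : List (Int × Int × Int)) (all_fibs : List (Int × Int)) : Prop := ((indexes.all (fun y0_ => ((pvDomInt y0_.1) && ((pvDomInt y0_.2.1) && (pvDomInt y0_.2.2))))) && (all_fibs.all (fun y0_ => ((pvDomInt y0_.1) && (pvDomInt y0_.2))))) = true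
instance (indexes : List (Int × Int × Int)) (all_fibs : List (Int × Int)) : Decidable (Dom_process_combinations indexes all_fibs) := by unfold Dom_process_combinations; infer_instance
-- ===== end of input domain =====

-- B replaces A's single-pass dict accumulation by a staged map/filter pipeline
-- (pure m-helper, ordered dedup of positive m-values, one filtering scan per
-- distinct m); objective: alternative decomposition, same return value.

-- all_fibs[i] (total form; a missing key is a Python KeyError, excluded by Pre_)
def pvFib (all_fibs : List (Int × Int)) (i : Int) : Int :=
  (PySem.Dict.mk all_fibs).getD i 0

-- ===== PORT A =====
def process_combinations (indexes : List (Int × Int × Int)) (all_fibs : List (Int × Int)) : List (Int × List ((Int × Int × Int) × (Int × Int × Int))) :=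
  (indexes.foldl (fun dict_m t =>
      let a := t.1; let b := t.2.1; let c := t.2.2
      let fa := pvFib all_fibs a
      let fb := pvFib all_fibs b
      let fc := pvFib all_fibs c
      let m := fa * fa + fb * fb + fc * fc - 3 * fa * fb * fc
      if 0 < m then
        if dict_m.contains m = false then
          dict_m.insert m [((a, b, c), (fa, fb, fc))]
        else
          -- dict_m[m] += [...] : read the current list, write it back extended
          dict_m.insert m (dict_m.getD m [] ++ [((a, b, c), (fa, fb, fc))])
      else dict_m)
    (PySem.Dict.empty)).items

-- ===== PORT B =====
-- B's helper m_of(t)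
def altM (all_fibs : List (Int × Int)) (t : Int × Int × Int) : Int :=
  let fa := (PySem.Dict.mk all_fibs).getD t.1 0
  let fb := (PySem.Dict.mk all_fibs).getD t.2.1 0
  let fc := (PySem.Dict.mk all_fibs).getD t.2.2 0
  fa * fa + fb * fb + fc * fc - 3 * fa * fb * fc

-- B's helper entry(t)
def altEnt (all_fibs : List (Int × Int)) (t : Int × Int × Int) : (Int × Int × Int) × (Int × Int × Int) :=
  ((t.1, t.2.1, t.2.2),
   ((PySem.Dict.mk all_fibs).getD t.1 0,
    (PySem.Dict.mk all_fibs).getD t.2.1 0,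
    (PySem.Dict.mk all_fibs).getD t.2.2 0))

def process_combinations_alt (indexes : List (Int × Int × Int)) (all_fibs : List (Int × Int)) : List (Int × List ((Int × Int × Int) × (Int × Int × Int))) :=
  let keys := PySem.List.dedup ((indexes.map (altM all_fibs)).filter (fun m => 0 < m))
  keys.map (fun m =>
    (m, (indexes.filter (fun t => altM all_fibs t == m)).map (altEnt all_fibs)))

-- ===== PRECONDITION & SPEC =====
-- Pre_ excludes exactly the inputs where Python's A (and B) raise KeyError:
-- some index of a triple is not a key of all_fibs.
def Pre_process_combinations (indexes : List (Int × Int × Int)) (all_fibs : List (Int × Int)) : Prop :=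
  ∀ t ∈ indexes, t.1 ∈ all_fibs.map Prod.fst ∧ t.2.1 ∈ all_fibs.map Prod.fst ∧ t.2.2 ∈ all_fibs.map Prod.fst
instance (indexes : List (Int × Int × Int)) (all_fibs : List (Int × Int)) : Decidable (Pre_process_combinations indexes all_fibs) := by unfold Pre_process_combinations; infer_instance

def pvWitness_process_combinations : (List (Int × Int × Int)) × (List (Int × Int)) :=
  ([(1, 2, 3), (3, 2, 1)], [(1, 1), (2, 1), (3, 2)])

def Spec_process_combinations (indexes : List (Int × Int × Int)) (all_fibs : List (Int × Int)) (out : List (Int × List ((Int × Int × Int) × (Int × Int × Int)))) : Prop := out = process_combinations_alt indexes all_fibs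
instance (indexes : List (Int × Int × Int)) (all_fibs : List (Int × Int)) (out : List (Int × List ((Int × Int × Int) × (Int × Int × Int)))) : Decidable (Spec_process_combinations indexes all_fibs out) := by unfold Spec_process_combinations; infer_instance

-- ===== CLAIM (what is proved, stated in full; the proofs are below) =====
def Claim_equal_process_combinations : Prop := ∀ (indexes : List (Int × Int × Int)) (all_fibs : List (Int × Int)), Dom_process_combinations indexes all_fibs → Pre_process_combinations indexes all_fibs → Spec_process_combinations indexes all_fibs (process_combinations indexes all_fibs)

-- ===== LEMMAS AND PROOFS =====

-- the surviving (m, entry) pairs of a list of triples (proof-side abbreviation)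
def pvPairs (all_fibs : List (Int × Int)) (l : List (Int × Int × Int)) : List (Int × ((Int × Int × Int) × (Int × Int × Int))) :=
  (l.filter (fun t => decide (0 < altM all_fibs t))).map (fun t => (altM all_fibs t, altEnt all_fibs t))

-- A's loop body is the modify step at (altM t, altEnt t) when altM t > 0
lemma stepA_eq (all_fibs : List (Int × Int)) :
    (fun (dict_m : PySem.Dict Int (List ((Int × Int × Int) × (Int × Int × Int)))) (t : Int × Int × Int) =>
      let a := t.1; let b := t.2.1; let c := t.2.2
      let fa := pvFib all_fibs a
      let fb := pvFib all_fibs b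
      let fc := pvFib all_fibs c
      let m := fa * fa + fb * fb + fc * fc - 3 * fa * fb * fc
      if 0 < m then
        if dict_m.contains m = false then
          dict_m.insert m [((a, b, c), (fa, fb, fc))]
        else
          dict_m.insert m (dict_m.getD m [] ++ [((a, b, c), (fa, fb, fc))])
      else dict_m)
    = fun dict_m t => if 0 < altM all_fibs t then
        dict_m.modify (altM all_fibs t) [] (fun x => x ++ [altEnt all_fibs t])
      else dict_m := by
  funext d t
  simp only [pvFib, altM, altEnt]
  split_ifs with hm hc
  · simp [PySem.Dict.modify, PySem.Dict.getD_of_not_contains _ _ hc]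
  · simp [PySem.Dict.modify]
  · rfl

-- the clean loop over triples is the modify-loop over the surviving pairs
lemma foldA_clean (all_fibs : List (Int × Int)) (l : List (Int × Int × Int))
    (d : PySem.Dict Int (List ((Int × Int × Int) × (Int × Int × Int)))) :
    l.foldl (fun dict_m t => if 0 < altM all_fibs t then
        dict_m.modify (altM all_fibs t) [] (fun x => x ++ [altEnt all_fibs t])
      else dict_m) d
    = (pvPairs all_fibs l).foldl (fun d p => d.modify p.1 [] (fun x => x ++ [p.2])) d := by
  induction l generalizing d with
  | nil => rfl
  | cons t ts ih =>
    by_cases hm : 0 < altM all_fibs t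
    · simp only [List.foldl_cons, pvPairs, List.filter_cons, hm, decide_true]
      exact ih _
    · simp only [List.foldl_cons, pvPairs, List.filter_cons, hm]
      exact ih _

-- B's key list is the dedup of the surviving pairs' first components
lemma keysB_eq (all_fibs : List (Int × Int)) (l : List (Int × Int × Int)) :
    (l.map (altM all_fibs)).filter (fun m => 0 < m)
      = (pvPairs all_fibs l).map Prod.fst := by
  simp [pvPairs, List.filter_map, Function.comp_def]

-- B's group at a positive key is the surviving pairs filtered at that key
lemma groupB_eq (all_fibs : List (Int × Int)) (l : List (Int × Int × Int)) (k : Int)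
    (hk : 0 < k) :
    ((pvPairs all_fibs l).filter (fun p => p.1 == k)).map Prod.snd
      = (l.filter (fun t => altM all_fibs t == k)).map (altEnt all_fibs) := by
  simp only [pvPairs, List.filter_map, List.map_map, Function.comp_def]
  congr 1
  rw [List.filter_filter]
  apply List.filter_congr
  intro t _
  by_cases h : altM all_fibs t = k
  · simp [h, hk]
  · simp [h]

-- ===== VERDICT (by name: the statement is the Claim_ definition above) =====
theorem process_combinations_spec : Claim_equal_process_combinations := by
  intro indexes all_fibs _ _
  unfold Spec_process_combinations process_combinations process_combinations_alt
  rw [stepA_eq, foldA_clean]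
  have hnd : ((pvPairs all_fibs indexes).foldl
      (fun d p => d.modify p.1 [] (fun x => x ++ [p.2])) PySem.Dict.empty).keys.Nodup :=
    PySem.Dict.nodup_keys_foldl_modify_key (l := pvPairs all_fibs indexes)
      (key := fun p => p.1) (d0 := []) (f := fun _ p x => x ++ [p.2])
      (d := PySem.Dict.empty) PySem.Dict.nodup_keys_empty
  rw [PySem.Dict.items_eq_map_keys _ hnd []]
  rw [PySem.Dict.keys_foldl_modify_key (l := pvPairs all_fibs indexes)
      (key := fun p => p.1) (d0 := []) (f := fun _ p x => x ++ [p.2])]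
  rw [PySem.Dict.keys_empty, PySem.Set.update_nil_left, keysB_eq]
  apply List.map_congr_left
  intro k hkmem
  have hkmem' : k ∈ (pvPairs all_fibs indexes).map Prod.fst :=
    (PySem.List.mem_dedup _ _).1 hkmem
  have hkpos : 0 < k := by
    rcases List.mem_map.1 hkmem' with ⟨p, hp, rfl⟩
    rcases List.mem_map.1 hp with ⟨t, ht, rfl⟩
    simpa using List.of_mem_filter ht
  rw [PySem.Dict.getD_foldl_modify_append, PySem.Dict.getD_empty, List.nil_append,
    groupB_eq _ _ _ hkpos]
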